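-- pv_equiv track=rewrite | github.com/zhangtrex/2017A2CS | ch25/recursion1.py | array6
-- ===== SOURCE A (Python) =====
-- def array6(a,i):
--     if i == len(a):
--         return False
--     if a[i] == 6:
--         return True
--     if array6(a,i+1) == True:
--         return True
--     return False
-- ===== SOURCE B (Python) =====
-- def array6(a, i):
--     # scan from max(i,0): a negative start wraps, then continues through
--     # the whole list, so it reduces to membership in the full list
--     start = 0 if i < 0 else i
--     return 6 in a[start:]
-- ===== Notes on version B (the rewrite author's own statement) =====
-- stated objective: simpler
-- what changed: Replaces A's boolean recursion with a single slice-and-membership test, using the fact that a negative start index wraps and then rescans the whole list, so the answer is just '6 in a[max(i,0):]'.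
import Mathlib
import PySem

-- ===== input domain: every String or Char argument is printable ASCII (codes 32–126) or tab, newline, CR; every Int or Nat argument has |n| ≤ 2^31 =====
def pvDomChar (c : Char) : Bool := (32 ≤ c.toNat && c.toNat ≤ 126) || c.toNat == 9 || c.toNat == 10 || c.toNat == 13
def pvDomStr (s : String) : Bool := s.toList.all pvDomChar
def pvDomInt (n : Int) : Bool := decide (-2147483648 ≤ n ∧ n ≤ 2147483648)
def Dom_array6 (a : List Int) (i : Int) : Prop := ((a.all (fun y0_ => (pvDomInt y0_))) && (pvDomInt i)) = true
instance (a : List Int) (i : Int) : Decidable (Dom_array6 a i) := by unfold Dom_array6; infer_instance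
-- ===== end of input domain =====

-- B replaces A's boolean recursion by a single slice-and-membership test (objective: simpler).

-- ===== PORT A =====
-- literal port of A's recursion; a[i] is pyGet?, the 'none' branch is Python's IndexError (excluded by Pre_)
def array6 (a : List Int) (i : Int) : Bool :=
  if i = (a.length : Int) then false
  else
    match h : PySem.List.pyGet? a i with
    | none => false          -- IndexError in Python; outside Pre_array6
    | some x =>
      if x = 6 then true
      else if array6 a (i + 1) = true then true
      else false
termination_by ((a.length : Int) + 1 - i).toNat
decreasing_by
  have hr : PySem.Raise.InRange a.length i := by
    by_contra hc
    rw [← PySem.List.pyGet?_eq_none_iff] at hc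
    simp [hc] at h
  unfold PySem.Raise.InRange at hr
  omega

-- ===== PORT B =====
-- port of Source B: start = 0 if i < 0 else i; return 6 in a[start:]
def array6_alt (a : List Int) (i : Int) : Bool :=
  let start : Int := if i < 0 then 0 else i
  (PySem.List.slice a (some start) none).contains 6

-- ===== PRECONDITION & SPEC =====
-- exactly the inputs on which Python's A returns (no IndexError): -len(a) ≤ i ≤ len(a)
def Pre_array6 (a : List Int) (i : Int) : Prop := -(a.length : Int) ≤ i ∧ i ≤ (a.length : Int)
instance (a : List Int) (i : Int) : Decidable (Pre_array6 a i) := by unfold Pre_array6; infer_instance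
def pvWitness_array6 : List Int × Int := ([1, 6, 3], 0)

def Spec_array6 (a : List Int) (i : Int) (out : Bool) : Prop := out = array6_alt a i
instance (a : List Int) (i : Int) (out : Bool) : Decidable (Spec_array6 a i out) := by unfold Spec_array6; infer_instance

-- ===== CLAIM (what is proved, stated in full; the proofs are below) =====
def Claim_equal_array6 : Prop := ∀ (a : List Int) (i : Int), Dom_array6 a i → Pre_array6 a i → Spec_array6 a i (array6 a i)

-- ===== LEMMAS AND PROOFS =====

-- A at a non-negative in-range start equals membership in the dropped suffix
theorem array6_nonneg (a : List Int) : ∀ k n : Nat, a.length - n = k → n ≤ a.length →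
    array6 a (n : Int) = (a.drop n).contains 6 := by
  intro k
  induction k with
  | zero =>
    intro n hk hn
    have hn' : n = a.length := by omega
    subst hn'
    rw [array6]
    simp
  | succ m ih =>
    intro n hk hn
    have hlt : n < a.length := by omega
    rw [array6]
    have hne : (n : Int) ≠ (a.length : Int) := by exact_mod_cast Nat.ne_of_lt hlt
    rw [if_neg hne]
    have hg := PySem.List.pyGet?_ofNat a n hlt
    have hdrop : a.drop n = a[n] :: a.drop (n + 1) := List.drop_eq_getElem_cons hlt
    have hcast : (n : Int) + 1 = ((n + 1 : Nat) : Int) := by push_cast; ring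
    split
    · next heq => rw [hg] at heq; exact absurd heq (by simp)
    · next x heq =>
      rw [hg] at heq
      obtain rfl : x = a[n] := by injection heq with h'; omega
      rw [hcast, ih (n + 1) (by omega) (by omega), hdrop]
      by_cases h6 : a[n] = 6
      · simp [h6]
      · have hb' : ((6 : Int) == a[n]) = false := beq_eq_false_iff_ne.mpr (Ne.symm h6)
        simp only [if_neg h6, List.contains_cons, hb', Bool.false_or]
        by_cases hc : (List.drop (n + 1) a).contains 6 <;> simp [hc]

-- A at a negative in-range start equals membership in the whole list
theorem array6_neg (a : List Int) : ∀ k : Nat, 0 < k → k ≤ a.length →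
    array6 a (-(k : Int)) = a.contains 6 := by
  intro k
  induction k with
  | zero => intro h; omega
  | succ m ih =>
    intro _ hle
    rw [array6]
    have hne : (-((m + 1 : Nat) : Int)) ≠ (a.length : Int) := by
      push_cast; omega
    rw [if_neg hne]
    have hidx : a.length - (m + 1) < a.length := by omega
    have hg : PySem.List.pyGet? a (-((m + 1 : Nat) : Int)) = some a[a.length - (m + 1)] := by
      rw [PySem.List.pyGet?_neg_natCast a (m + 1) (by omega) hle, List.getElem?_eq_getElem hidx]
    have htail : array6 a (-((m + 1 : Nat) : Int) + 1) = a.contains 6 := by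
      rcases Nat.eq_zero_or_pos m with hm | hm
      · subst hm
        have h0 : (-((0 + 1 : Nat) : Int) + 1) = ((0 : Nat) : Int) := by norm_num
        have hnn := array6_nonneg a a.length 0 rfl (Nat.zero_le a.length)
        rw [h0, hnn]
        simp
      · have : (-((m + 1 : Nat) : Int) + 1) = -((m : Nat) : Int) := by push_cast; ring
        rw [this, ih hm (by omega)]
    split
    · next heq => rw [hg] at heq; exact absurd heq (by simp)
    · next x heq =>
      rw [hg] at heq
      obtain rfl : x = a[a.length - (m + 1)] := by injection heq with h'; omega
      rw [htail]
      by_cases h6 : a[a.length - (m + 1)] = 6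
      · have hmem : (6 : Int) ∈ a := h6 ▸ List.getElem_mem hidx
        simp [h6, hmem]
      · simp [h6]

-- ===== VERDICT (by name: the statement is the Claim_ definition above) =====
theorem array6_spec : Claim_equal_array6 := by
  intro a i _ hpre
  obtain ⟨hlo, hhi⟩ := hpre
  unfold Spec_array6
  show array6 a i = (PySem.List.slice a (some (if i < 0 then 0 else i)) none).contains 6
  by_cases hi : i < 0
  · -- negative start: A scans the wraparound suffix then the whole list ⇒ membership in a
    have hk : i = -(((-i).toNat : Nat) : Int) := by omega
    rw [if_pos hi]
    simp only [PySem.List.slice_zero_start, PySem.List.slice_none_none]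
    rw [hk, array6_neg a (-i).toNat (by omega) (by omega)]
  · -- non-negative start: membership in the suffix a[i:]
    have hn : i = ((i.toNat : Nat) : Int) := by omega
    rw [if_neg hi, hn, PySem.List.slice_from_natCast,
        array6_nonneg a (a.length - i.toNat) i.toNat rfl (by omega)]
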